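-- pv_equiv track=rewrite | github.com/mishanwong/sudoku | sudoku.py | _check_consistent_helper
-- ===== SOURCE A (Python) =====
-- from collections import Counter
--
-- def _check_consistent_helper(array):
--     counter = Counter(array)
--     del counter[0]
--     values = list(counter.values())
--     for value in values:
--         if value != 1:
--             return False
--
--     return True
-- ===== SOURCE B (Python) =====
-- def _check_consistent_helper(array):
--     seen = set()
--     for x in array:
--         if x == 0:
--             continue
--         if x in seen:
--             return False
--         seen.add(x)
--     return True
-- ===== Notes on version B (the rewrite author's own statement) =====
-- stated objective: faster
-- what changed: Replaces Counter-building plus a second pass over its values with a single streaming pass over the array that keeps a 'seen' set of non-zero elements and returns False on the first repeat (early exit).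
import Mathlib
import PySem

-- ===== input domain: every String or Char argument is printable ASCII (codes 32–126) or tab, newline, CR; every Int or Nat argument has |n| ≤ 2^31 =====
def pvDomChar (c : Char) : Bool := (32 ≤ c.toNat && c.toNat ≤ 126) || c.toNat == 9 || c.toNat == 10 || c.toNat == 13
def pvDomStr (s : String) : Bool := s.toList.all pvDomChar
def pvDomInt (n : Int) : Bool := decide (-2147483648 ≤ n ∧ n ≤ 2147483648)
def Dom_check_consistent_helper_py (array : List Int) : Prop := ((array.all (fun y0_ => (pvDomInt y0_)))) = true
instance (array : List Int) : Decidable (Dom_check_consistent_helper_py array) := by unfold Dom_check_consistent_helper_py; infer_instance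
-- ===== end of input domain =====

-- B replaces the Counter build plus a second pass over counter.values with one streaming
-- pass keeping a 'seen' set of non-zero elements, with an early exit on the first repeat.


-- ===== PORT A =====
-- the 'for value in values: if value != 1: return False' loop
def pvALoop : List Int → Bool
  | [] => true
  | value :: rest => if value ≠ 1 then false else pvALoop rest

def check_consistent_helper_py (array : List Int) : Bool :=
  let counter := PySem.Dict.counter array
  let counter := counter.erase 0
  let values := counter.values
  pvALoop values

-- ===== PORT B =====
-- the streaming loop of Source B: skip zeros, fail on a repeat, otherwise extend 'seen'
def pvBLoop (seen : PySem.Set Int) : List Int → Bool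
  | [] => true
  | x :: rest =>
    if x == 0 then pvBLoop seen rest
    else if PySem.Set.contains seen x then false
    else pvBLoop (PySem.Set.add seen x) rest

def check_consistent_helper_py_alt (array : List Int) : Bool :=
  pvBLoop PySem.Set.empty array

-- ===== PRECONDITION & SPEC =====
def Spec_check_consistent_helper_py (array : List Int) (out : Bool) : Prop := out = check_consistent_helper_py_alt array
instance (array : List Int) (out : Bool) : Decidable (Spec_check_consistent_helper_py array out) := by unfold Spec_check_consistent_helper_py; infer_instance

-- ===== CLAIM (what is proved, stated in full; the proofs are below) =====
def Claim_equal_check_consistent_helper_py : Prop := ∀ (array : List Int), Dom_check_consistent_helper_py array → Spec_check_consistent_helper_py array (check_consistent_helper_py array)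

-- ===== LEMMAS AND PROOFS =====

theorem pvALoop_eq_all (vs : List Int) : pvALoop vs = vs.all (fun v => v == 1) := by
  induction vs with
  | nil => rfl
  | cons v rest ih => by_cases h : v = 1 <;> simp [pvALoop, h, ih]

-- A returns true iff every non-zero element of the array occurs exactly once
theorem A_char (array : List Int) :
    check_consistent_helper_py array = true ↔
      ∀ k ∈ array, k ≠ 0 → array.count k = 1 := by
  simp only [check_consistent_helper_py, pvALoop_eq_all, PySem.Dict.values, PySem.Dict.erase,
        PySem.Dict.items_counter]
  simp [List.all_eq_true, PySem.Set.mem_ofList]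
  constructor
  · intro h k hk hne
    rcases h k hk with h0 | h1
    · exact absurd h0 hne
    · exact h1
  · intro h k hk
    by_cases h0 : k = 0
    · exact Or.inl h0
    · exact Or.inr (h k hk h0)

-- the invariant of B's loop
theorem pvBLoop_char (xs : List Int) (seen : PySem.Set Int) :
    pvBLoop seen xs = true ↔
      ((xs.filter (fun x => x != 0)).Nodup ∧ ∀ x ∈ xs, x ≠ 0 → x ∉ seen) := by
  induction xs generalizing seen with
  | nil => simp [pvBLoop]
  | cons x rest ih =>
    by_cases hx : x = 0
    · subst hx; simp [pvBLoop, ih]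
    · by_cases hs : x ∈ seen
      · rw [show pvBLoop seen (x :: rest) = false by
            simp [pvBLoop, hx, PySem.Set.contains, hs]]
        simp only [Bool.false_eq_true, false_iff, not_and]
        intro _ hmem
        exact hmem x (List.mem_cons_self ..) hx hs
      · rw [show pvBLoop seen (x :: rest) = pvBLoop (PySem.Set.add seen x) rest by
            simp [pvBLoop, hx, PySem.Set.contains, hs]]
        rw [ih]
        have hfc : (x :: rest).filter (fun x => x != 0) = x :: rest.filter (fun x => x != 0) := by
          simp [hx]
        rw [hfc]
        simp only [List.nodup_cons, List.mem_filter, List.mem_cons, bne_iff_ne, ne_eq]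
        constructor
        · rintro ⟨hnd, hmem⟩
          have hxr : x ∉ rest := fun hmx =>
            (hmem x hmx hx) ((PySem.Set.mem_add seen x x).mpr (Or.inr rfl))
          refine ⟨⟨fun h => hxr h.1, hnd⟩, ?_⟩
          rintro y (rfl | hy) hyne
          · exact hs
          · exact fun hys => hmem y hy hyne ((PySem.Set.mem_add seen x y).mpr (Or.inl hys))
        · rintro ⟨⟨hxf, hnd⟩, hmem⟩
          refine ⟨hnd, fun y hy hyne hyadd => ?_⟩
          rcases (PySem.Set.mem_add seen x y).mp hyadd with hys | rfl
          · exact hmem y (Or.inr hy) hyne hys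
          · exact hxf ⟨hy, hyne⟩

-- the two characterisations coincide
theorem nodup_filter_iff_counts (xs : List Int) :
    (xs.filter (fun x => x != 0)).Nodup ↔ ∀ k ∈ xs, k ≠ 0 → xs.count k = 1 := by
  rw [List.nodup_iff_count_le_one]
  constructor
  · intro h k hk hkne
    have h1 : 0 < xs.count k := List.count_pos_iff.mpr hk
    have h2 := h k
    rw [List.count_filter (by simpa using hkne)] at h2
    omega
  · intro h k
    by_cases hk0 : k = 0
    · subst hk0
      have h0 : (0 : Int) ∉ xs.filter (fun x => x != 0) := by simp
      simp [List.count_eq_zero_of_not_mem h0]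
    · rw [List.count_filter (by simpa using hk0)]
      by_cases hk : k ∈ xs
      · exact le_of_eq (h k hk hk0)
      · simp [List.count_eq_zero_of_not_mem hk]

-- ===== VERDICT (by name: the statement is the Claim_ definition above) =====
theorem check_consistent_helper_py_spec : Claim_equal_check_consistent_helper_py := by
  intro array _
  unfold Spec_check_consistent_helper_py
  rw [Bool.eq_iff_iff, A_char, ← nodup_filter_iff_counts]
  rw [show check_consistent_helper_py_alt array = pvBLoop PySem.Set.empty array from rfl, pvBLoop_char]
  simp [PySem.Set.empty]
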